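-- pv_equiv track=rewrite | github.com/archeraghi/ThermalDrones | heat_old2.py | pulse_heat
-- ===== SOURCE A (Python) =====
-- morse_code = {
--     'A': '.-', 'B': '-...', 'C': '-.-.', 'D': '-..', 'E': '.',
--     'F': '..-.', 'G': '--.', 'H': '....', 'I': '..', 'J': '.---',
--     'K': '-.-', 'L': '.-..', 'M': '--', 'N': '-.', 'O': '---',
--     'P': '.--.', 'Q': '--.-', 'R': '.-.', 'S': '...', 'T': '-',
--     'U': '..-', 'V': '...-', 'W': '.--', 'X': '-..-', 'Y': '-.--', 'Z': '--..'
-- }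
--
-- def pulse_heat(sequence, heat_dot=5, heat_dash=10, duration_dot=1, duration_dash=3, gap_dot=1, gap_between_elements=1, gap_between_letters=3):
--     heat_pulses = []
--     for char in sequence.upper():
--         if char in morse_code:  # Check if the character is in the Morse code dictionary
--             for i, symbol in enumerate(morse_code[char]):
--                 if symbol == '.':
--                     heat_pulses.extend([heat_dot] * duration_dot)  # Medium heat for dots
--                 elif symbol == '-':
--                     heat_pulses.extend([heat_dash] * duration_dash)  # Higher heat for dashes
--                 # Add gap between elements of the same letter
--                 if i < len(morse_code[char]) - 1:
--                     heat_pulses.extend([0] * gap_between_elements)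
--             # Add gap between letters
--             heat_pulses.extend([0] * gap_between_letters)
--     return heat_pulses
-- ===== SOURCE B (Python) =====
-- # Morse codes encoded as tuples of booleans: False = dot, True = dash.
-- MORSE_BITS = {
--     'A': (False, True), 'B': (True, False, False, False), 'C': (True, False, True, False),
--     'D': (True, False, False), 'E': (False,), 'F': (False, False, True, False),
--     'G': (True, True, False), 'H': (False, False, False, False), 'I': (False, False),
--     'J': (False, True, True, True), 'K': (True, False, True), 'L': (False, True, False, False),
--     'M': (True, True), 'N': (True, False), 'O': (True, True, True),
--     'P': (False, True, True, False), 'Q': (True, True, False, True), 'R': (False, True, False),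
--     'S': (False, False, False), 'T': (True,), 'U': (False, False, True),
--     'V': (False, False, False, True), 'W': (False, True, True), 'X': (True, False, False, True),
--     'Y': (True, False, True, True), 'Z': (True, True, False, False),
-- }
--
--
-- def pulse_heat(sequence, heat_dot=5, heat_dash=10, duration_dot=1, duration_dash=3, gap_dot=1, gap_between_elements=1, gap_between_letters=3):
--     def seg(dash):
--         return [heat_dash] * duration_dash if dash else [heat_dot] * duration_dot
--
--     def render(bits):
--         if not bits:
--             return []
--         head = seg(bits[0])
--         if len(bits) == 1:
--             return head
--         return head + [0] * gap_between_elements + render(bits[1:])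
--
--     codes = [MORSE_BITS[c] for c in sequence.upper() if c in MORSE_BITS]
--     return [p for bits in codes for p in render(bits) + [0] * gap_between_letters]
-- ===== Notes on version B (the rewrite author's own statement) =====
-- stated objective: alternative
-- what changed: B re-encodes the Morse table as boolean codes (dash=true), turns the sequence into a list of codes with one filter-map pass, and flattens recursively joined per-letter pulse lists, replacing A's indexed nested loop with its per-symbol last-index check.
import Mathlib
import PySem

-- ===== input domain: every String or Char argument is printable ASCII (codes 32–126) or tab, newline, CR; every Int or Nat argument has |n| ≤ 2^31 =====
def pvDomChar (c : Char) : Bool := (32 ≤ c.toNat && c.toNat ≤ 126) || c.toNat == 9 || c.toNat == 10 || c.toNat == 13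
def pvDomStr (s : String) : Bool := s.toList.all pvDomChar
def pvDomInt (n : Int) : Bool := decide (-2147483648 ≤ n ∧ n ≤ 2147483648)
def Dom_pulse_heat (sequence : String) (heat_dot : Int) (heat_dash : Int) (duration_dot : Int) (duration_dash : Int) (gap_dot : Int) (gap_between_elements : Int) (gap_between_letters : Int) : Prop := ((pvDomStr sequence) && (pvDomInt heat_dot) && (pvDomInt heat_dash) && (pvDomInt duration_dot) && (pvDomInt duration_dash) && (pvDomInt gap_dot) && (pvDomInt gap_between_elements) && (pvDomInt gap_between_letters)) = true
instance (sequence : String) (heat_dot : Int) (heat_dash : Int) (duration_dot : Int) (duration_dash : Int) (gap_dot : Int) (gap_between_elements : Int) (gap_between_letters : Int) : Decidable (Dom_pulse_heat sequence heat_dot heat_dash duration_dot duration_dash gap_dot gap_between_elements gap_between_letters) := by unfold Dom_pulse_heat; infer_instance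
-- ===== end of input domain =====

-- B re-encodes the Morse table as boolean codes (dash = true) and replaces A's indexed
-- nested loop by a filter-map-to-codes pass plus a flat concatenation of recursively
-- joined per-letter pulse lists; objective: alternative decomposition, same cost.

-- ===== PORT A =====
-- the module-level morse_code dict (codes kept as explicit char lists: a Python str is a sequence of chars)
def morseA : List (Char × List Char) :=
  [('A', ['.','-']), ('B', ['-','.','.','.']), ('C', ['-','.','-','.']), ('D', ['-','.','.']), ('E', ['.']),
   ('F', ['.','.','-','.']), ('G', ['-','-','.']), ('H', ['.','.','.','.']), ('I', ['.','.']), ('J', ['.','-','-','-']),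
   ('K', ['-','.','-']), ('L', ['.','-','.','.']), ('M', ['-','-']), ('N', ['-','.']), ('O', ['-','-','-']),
   ('P', ['.','-','-','.']), ('Q', ['-','-','.','-']), ('R', ['.','-','.']), ('S', ['.','.','.']), ('T', ['-']),
   ('U', ['.','.','-']), ('V', ['.','.','.','-']), ('W', ['.','-','-']), ('X', ['-','.','.','-']), ('Y', ['-','.','-','-']), ('Z', ['-','-','.','.'])]

def pulse_heat (sequence : String) (heat_dot : Int) (heat_dash : Int) (duration_dot : Int) (duration_dash : Int) (gap_dot : Int) (gap_between_elements : Int) (gap_between_letters : Int) : List Int :=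
  (PySem.Str.upper sequence).toList.foldl (fun heat_pulses ch =>
    match morseA.lookup ch with     -- 'if char in morse_code' + 'morse_code[char]'
    | none => heat_pulses
    | some code =>
      let heat_pulses := (PySem.List.enumerate code).foldl (fun acc p =>
          let acc := if p.2 = '.' then acc ++ List.replicate duration_dot.toNat heat_dot
            else if p.2 = '-' then acc ++ List.replicate duration_dash.toNat heat_dash
            else acc
          if p.1 < (code.length : Int) - 1 then acc ++ List.replicate gap_between_elements.toNat 0 else acc)
        heat_pulses
      heat_pulses ++ List.replicate gap_between_letters.toNat 0) []

-- ===== PORT B =====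
-- MORSE_BITS: Morse codes as boolean lists, false = dot, true = dash
def morseBitsB : List (Char × List Bool) :=
  [('A', [false, true]), ('B', [true, false, false, false]), ('C', [true, false, true, false]),
   ('D', [true, false, false]), ('E', [false]), ('F', [false, false, true, false]),
   ('G', [true, true, false]), ('H', [false, false, false, false]), ('I', [false, false]),
   ('J', [false, true, true, true]), ('K', [true, false, true]), ('L', [false, true, false, false]),
   ('M', [true, true]), ('N', [true, false]), ('O', [true, true, true]),
   ('P', [false, true, true, false]), ('Q', [true, true, false, true]), ('R', [false, true, false]),
   ('S', [false, false, false]), ('T', [true]), ('U', [false, false, true]),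
   ('V', [false, false, false, true]), ('W', [false, true, true]), ('X', [true, false, false, true]),
   ('Y', [true, false, true, true]), ('Z', [true, true, false, false])]

-- seg(dash)
def segB (heat_dot heat_dash duration_dot duration_dash : Int) (dash : Bool) : List Int :=
  if dash then List.replicate duration_dash.toNat heat_dash else List.replicate duration_dot.toNat heat_dot

-- render(bits): recursive join of the symbol segments with the element gap between them
def renderB (heat_dot heat_dash duration_dot duration_dash ge : Int) : List Bool → List Int
  | [] => []
  | b :: rest =>
    let head := segB heat_dot heat_dash duration_dot duration_dash b
    if rest.isEmpty then head
    else head ++ List.replicate ge.toNat 0 ++ renderB heat_dot heat_dash duration_dot duration_dash ge rest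

def pulse_heat_alt (sequence : String) (heat_dot : Int) (heat_dash : Int) (duration_dot : Int) (duration_dash : Int) (gap_dot : Int) (gap_between_elements : Int) (gap_between_letters : Int) : List Int :=
  let codes : List (List Bool) :=
    (PySem.Str.upper sequence).toList.filterMap (fun c => morseBitsB.lookup c)
  codes.flatMap (fun bits =>
    renderB heat_dot heat_dash duration_dot duration_dash gap_between_elements bits
      ++ List.replicate gap_between_letters.toNat 0)

-- ===== PRECONDITION & SPEC =====
def Spec_pulse_heat (sequence : String) (heat_dot : Int) (heat_dash : Int) (duration_dot : Int) (duration_dash : Int) (gap_dot : Int) (gap_between_elements : Int) (gap_between_letters : Int) (out : List Int) : Prop := out = pulse_heat_alt sequence heat_dot heat_dash duration_dot duration_dash gap_dot gap_between_elements gap_between_letters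
instance (sequence : String) (heat_dot : Int) (heat_dash : Int) (duration_dot : Int) (duration_dash : Int) (gap_dot : Int) (gap_between_elements : Int) (gap_between_letters : Int) (out : List Int) : Decidable (Spec_pulse_heat sequence heat_dot heat_dash duration_dot duration_dash gap_dot gap_between_elements gap_between_letters out) := by unfold Spec_pulse_heat; infer_instance

-- ===== CLAIM (what is proved, stated in full; the proofs are below) =====
def Claim_equal_pulse_heat : Prop := ∀ (sequence : String) (heat_dot : Int) (heat_dash : Int) (duration_dot : Int) (duration_dash : Int) (gap_dot : Int) (gap_between_elements : Int) (gap_between_letters : Int), Dom_pulse_heat sequence heat_dot heat_dash duration_dot duration_dash gap_dot gap_between_elements gap_between_letters → Spec_pulse_heat sequence heat_dot heat_dash duration_dot duration_dash gap_dot gap_between_elements gap_between_letters (pulse_heat sequence heat_dot heat_dash duration_dot duration_dash gap_dot gap_between_elements gap_between_letters)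

-- ===== LEMMAS AND PROOFS =====

-- per-symbol contribution of A's inner loop (symbol pulses, then the element gap unless last)
def gIn (n : Int) (dot dash sep : List Int) (p : Int × Char) : List Int :=
  (if p.2 = '.' then dot else if p.2 = '-' then dash else []) ++ (if p.1 < n - 1 then sep else [])

-- A's whole contribution for one matched letter
def chunkA (dot dash sep lg : List Int) (code : List Char) : List Int :=
  (PySem.List.enumerate code).flatMap (gIn (code.length : Int) dot dash sep) ++ lg

theorem lookup_map_fst {κ β γ : Type} [BEq κ] (l : List (κ × β)) (F : β → γ) (ch : κ) :
    (l.map (fun p => (p.1, F p.2))).lookup ch = (l.lookup ch).map F := by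
  induction l with
  | nil => simp [List.lookup]
  | cons hd tl ih =>
    simp only [List.map_cons, List.lookup]
    cases ch == hd.1 <;> simp [ih]

theorem lookup_prop {κ β : Type} [BEq κ] (C : β → Prop) (l : List (κ × β)) (ch : κ) (v : β)
    (h : ∀ p ∈ l, C p.2) (hl : l.lookup ch = some v) : C v := by
  induction l with
  | nil => simp [List.lookup] at hl
  | cons hd tl ih =>
    simp only [List.lookup] at hl
    cases hbe : ch == hd.1 with
    | true => rw [hbe] at hl; simp at hl; subst hl; exact h hd (by simp)
    | false => rw [hbe] at hl; simp at hl; exact ih (fun p hp => h p (by simp [hp])) hl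

-- A's table is B's table with each bit rendered as its symbol character
theorem tableRel : morseA
    = morseBitsB.map (fun p => (p.1, p.2.map (fun b => if b then '-' else '.'))) := by decide

theorem flatMap_filterMap {α β γ : Type} (f : α → Option β) (g : β → List γ) (l : List α) :
    (l.filterMap f).flatMap g
      = l.flatMap (fun x => match f x with | none => [] | some v => g v) := by
  induction l with
  | nil => rfl
  | cons h t ih => cases hf : f h <;> simp [List.filterMap_cons, hf, ih]

theorem chunk_eq (heat_dot heat_dash duration_dot duration_dash ge : Int) (lg : List Int)
    (p : Char × List Bool) (hp : p ∈ morseBitsB) :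
    chunkA (List.replicate duration_dot.toNat heat_dot) (List.replicate duration_dash.toNat heat_dash)
        (List.replicate ge.toNat 0) lg (p.2.map (fun b => if b then '-' else '.'))
      = renderB heat_dot heat_dash duration_dot duration_dash ge p.2 ++ lg := by
  fin_cases hp <;>
    simp [chunkA, renderB, segB, gIn, PySem.List.enumerate, List.append_assoc]

theorem A_inner (dot dash sep : List Int) (code : List Char) (acc : List Int) :
    (PySem.List.enumerate code).foldl (fun acc p =>
      let acc := if p.2 = '.' then acc ++ dot else if p.2 = '-' then acc ++ dash else acc
      if p.1 < (code.length : Int) - 1 then acc ++ sep else acc) acc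
    = acc ++ (PySem.List.enumerate code).flatMap (gIn (code.length : Int) dot dash sep) := by
  rw [← PySem.List.foldl_append_eq_flatMap]
  apply PySem.List.foldl_congr_mem
  intro b p hp
  simp only [gIn]
  split_ifs <;> simp [List.append_assoc]

theorem pulse_heat_spec : Claim_equal_pulse_heat := by
  intro sequence heat_dot heat_dash duration_dot duration_dash gap_dot ge gl _
  unfold Spec_pulse_heat pulse_heat pulse_heat_alt
  set dot := List.replicate duration_dot.toNat heat_dot with hdot
  set dash := List.replicate duration_dash.toNat heat_dash with hdash
  set sep := List.replicate ge.toNat (0 : Int) with hsep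
  set lg := List.replicate gl.toNat (0 : Int) with hlg
  simp only []
  rw [flatMap_filterMap]
  rw [show ((PySem.Str.upper sequence).toList.foldl (fun heat_pulses ch =>
        match morseA.lookup ch with
        | none => heat_pulses
        | some code =>
          (PySem.List.enumerate code).foldl (fun acc p =>
              let acc := if p.2 = '.' then acc ++ dot else if p.2 = '-' then acc ++ dash else acc
              if p.1 < (code.length : Int) - 1 then acc ++ sep else acc) heat_pulses
            ++ lg) [])
      = (PySem.Str.upper sequence).toList.foldl (fun b ch =>
          b ++ match morseA.lookup ch with
               | none => []
               | some code => chunkA dot dash sep lg code) []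
    from by
      apply PySem.List.foldl_congr_mem
      intro b ch _
      cases hl : morseA.lookup ch with
      | none => simp
      | some code => simp only [A_inner, chunkA, List.append_assoc]]
  rw [PySem.List.foldl_append_eq_flatMap, List.nil_append]
  congr 1
  funext ch
  rw [tableRel, lookup_map_fst]
  cases hl : morseBitsB.lookup ch with
  | none => rfl
  | some bits =>
    simp only [Option.map_some]
    exact lookup_prop
      (fun v => chunkA dot dash sep lg (v.map (fun b => if b then '-' else '.'))
        = renderB heat_dot heat_dash duration_dot duration_dash ge v ++ lg)
      morseBitsB ch bits
      (fun p hp => chunk_eq heat_dot heat_dash duration_dot duration_dash ge lg p hp) hl
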